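-- pv_equiv track=rewrite | github.com/dianjie111/newguofang | smart_sentinel/modules/suggestion.py | _get_specific_suggestions
-- ===== SOURCE A (Python) =====
-- def _get_specific_suggestions(detections, location):
--     """
--     根据目标类型和数量生成特定建议
--
--     Args:
--         detections: 检测结果列表
--         location: 位置信息
--
--     Returns:
--         特定建议列表
--     """
--     suggestions = []
--
--     # 统计目标数量
--     target_counts = {}
--     for detection in detections:
--         class_name = detection['class']
--         if class_name in target_counts:
--             target_counts[class_name] += 1
--         else:
--             target_counts[class_name] = 1
--
--     # 针对人员的建议
--     if 'person' in target_counts: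
--         person_count = target_counts['person']
--         if person_count >= 3:
--             suggestions.append('注意人员聚集情况，可能存在群体性活动')
--         elif person_count >= 1:
--             suggestions.append('观察人员行为特征，确认是否有异常举动')
--
--     # 针对车辆的建议
--     vehicle_count = 0
--     for vehicle in ['car', 'bus', 'motorbike']:
--         if vehicle in target_counts:
--             vehicle_count += target_counts[vehicle]
--
--     if vehicle_count >= 2:
--         suggestions.append('注意车辆集群情况，可能存在协同行动')
--     elif vehicle_count >= 1:
--         suggestions.append('记录车辆特征和牌照信息')
--
--     # 针对位置的建议
--     if location:
--         suggestions.append(f'重点关注{location}方向的目标动向')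
--
--     return suggestions
-- ===== SOURCE B (Python) =====
-- # Table-driven rewrite: the thresholds/messages become a rule table, and one
-- # generic interpreter loop evaluates each rule (count classes in the rule's
-- # group, emit the first tier whose threshold is met); no frequency dict.
-- _RULES = [
--     (('person',),
--      ((3, '注意人员聚集情况，可能存在群体性活动'),
--       (1, '观察人员行为特征，确认是否有异常举动'))),
--     (('car', 'bus', 'motorbike'),
--      ((2, '注意车辆集群情况，可能存在协同行动'),
--       (1, '记录车辆特征和牌照信息'))),
-- ]
--
-- def _get_specific_suggestions(detections, location):
--     classes = [d['class'] for d in detections]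
--     suggestions = []
--     for group, tiers in _RULES:
--         n = sum(c in group for c in classes)
--         msg = next((m for t, m in tiers if n >= t), None)
--         if msg is not None:
--             suggestions.append(msg)
--     if location:
--         suggestions.append(f'重点关注{location}方向的目标动向')
--     return suggestions
-- ===== Notes on version B (the rewrite author's own statement) =====
-- stated objective: alternative
-- what changed: Replaces the build-a-frequency-dict-then-hardcoded-branches strategy with a data-driven rule table: a generic interpreter loop counts, per rule, the detections whose class is in the rule's group and emits the first tier message whose threshold is met; no dict and no per-category branch code.
import Mathlib
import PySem

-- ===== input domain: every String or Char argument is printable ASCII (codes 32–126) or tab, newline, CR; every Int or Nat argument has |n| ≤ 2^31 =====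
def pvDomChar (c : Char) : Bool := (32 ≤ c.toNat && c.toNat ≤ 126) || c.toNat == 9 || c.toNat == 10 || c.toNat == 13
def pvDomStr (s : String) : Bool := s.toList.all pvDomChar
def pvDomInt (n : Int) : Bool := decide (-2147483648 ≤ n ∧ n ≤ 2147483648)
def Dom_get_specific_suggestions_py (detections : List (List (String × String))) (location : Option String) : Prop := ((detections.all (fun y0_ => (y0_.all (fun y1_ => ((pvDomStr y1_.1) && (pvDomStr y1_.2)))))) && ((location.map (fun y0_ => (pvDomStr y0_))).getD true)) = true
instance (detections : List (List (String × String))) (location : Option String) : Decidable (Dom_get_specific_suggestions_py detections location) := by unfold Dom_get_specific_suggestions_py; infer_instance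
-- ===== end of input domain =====

-- B replaces A's frequency-dict-plus-hardcoded-branches with a rule table interpreted by one generic loop (alternative; same cost).

-- ===== PORT A =====
-- detection['class'] : first-match lookup in the association list (KeyError excluded by Pre_)
def pvClass (d : List (String × String)) : String :=
  ((d.find? (fun p => p.1 == "class")).map (·.2)).getD ""

def get_specific_suggestions_py (detections : List (List (String × String))) (location : Option String) : List String :=
  let target_counts : PySem.Dict String Int :=
    detections.foldl (fun tc d =>
      let class_name := pvClass d
      if tc.contains class_name then tc.insert class_name (tc.getD class_name 0 + 1)
      else tc.insert class_name 1) PySem.Dict.empty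
  let suggestions : List String := []
  let suggestions :=
    if target_counts.contains "person" then
      let person_count := target_counts.getD "person" 0
      if person_count ≥ 3 then suggestions ++ ["注意人员聚集情况，可能存在群体性活动"]
      else if person_count ≥ 1 then suggestions ++ ["观察人员行为特征，确认是否有异常举动"]
      else suggestions
    else suggestions
  let vehicle_count : Int :=
    ["car", "bus", "motorbike"].foldl (fun vc v =>
      if target_counts.contains v then vc + target_counts.getD v 0 else vc) 0
  let suggestions :=
    if vehicle_count ≥ 2 then suggestions ++ ["注意车辆集群情况，可能存在协同行动"]
    else if vehicle_count ≥ 1 then suggestions ++ ["记录车辆特征和牌照信息"]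
    else suggestions
  match location with
  | none => suggestions
  | some s => if s == "" then suggestions else suggestions ++ ["重点关注" ++ s ++ "方向的目标动向"]

-- ===== PORT B =====
-- the rule table: (group of class names, tiers of (threshold, message))
def pvRules : List (List String × List (Int × String)) :=
  [ (["person"],
     [(3, "注意人员聚集情况，可能存在群体性活动"),
      (1, "观察人员行为特征，确认是否有异常举动")]),
    (["car", "bus", "motorbike"],
     [(2, "注意车辆集群情况，可能存在协同行动"),
      (1, "记录车辆特征和牌照信息")]) ]

def get_specific_suggestions_py_alt (detections : List (List (String × String))) (location : Option String) : List String :=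
  let classes := detections.map pvClass
  let suggestions :=
    pvRules.foldl (fun acc rule =>
      let n : Int := (classes.countP (fun c => rule.1.contains c) : Int)
      match rule.2.find? (fun tm => decide (n ≥ tm.1)) with
      | some tm => acc ++ [tm.2]
      | none => acc) []
  match location with
  | none => suggestions
  | some s => if s == "" then suggestions else suggestions ++ ["重点关注" ++ s ++ "方向的目标动向"]

-- ===== PRECONDITION & SPEC =====
-- Pre_ excludes exactly the inputs where Python A raises KeyError: a detection without a 'class' key.
def Pre_get_specific_suggestions_py (detections : List (List (String × String))) (location : Option String) : Prop :=
  detections.all (fun d => (d.find? (fun p => p.1 == "class")).isSome) = true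
instance (detections : List (List (String × String))) (location : Option String) : Decidable (Pre_get_specific_suggestions_py detections location) := by unfold Pre_get_specific_suggestions_py; infer_instance
def pvWitness_get_specific_suggestions_py : (List (List (String × String))) × Option String :=
  ([[("class", "person")], [("class", "car")]], some "north")

def Spec_get_specific_suggestions_py (detections : List (List (String × String))) (location : Option String) (out : List String) : Prop := out = get_specific_suggestions_py_alt detections location
instance (detections : List (List (String × String))) (location : Option String) (out : List String) : Decidable (Spec_get_specific_suggestions_py detections location out) := by unfold Spec_get_specific_suggestions_py; infer_instance

-- ===== CLAIM (what is proved, stated in full; the proofs are below) =====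
def Claim_equal_get_specific_suggestions_py : Prop := ∀ (detections : List (List (String × String))) (location : Option String), Dom_get_specific_suggestions_py detections location → Pre_get_specific_suggestions_py detections location → Spec_get_specific_suggestions_py detections location (get_specific_suggestions_py detections location)

-- ===== LEMMAS AND PROOFS =====

-- A's counting loop builds exactly the counter of the class names
theorem pv_fold_eq_counter (detections : List (List (String × String))) :
    detections.foldl (fun tc d =>
      let class_name := pvClass d
      if tc.contains class_name then tc.insert class_name (tc.getD class_name 0 + 1)
      else tc.insert class_name 1) PySem.Dict.empty
    = PySem.Dict.counter (detections.map pvClass) := by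
  rw [← PySem.Dict.foldl_insert_getD_add_one_eq_counter, List.foldl_map]
  apply PySem.List.foldl_congr_mem
  intro tc d _
  by_cases h : tc.contains (pvClass d)
  · simp [h]
  · have h0 : tc.getD (pvClass d) 0 = 0 :=
      PySem.Dict.getD_of_not_contains tc 0 (by simpa using h)
    simp [h, h0]

-- one two-tier rule of B's interpreter = the corresponding if-chain
theorem pv_rule2 (n t1 t2 : Int) (m1 m2 : String) (acc : List String) :
    (match ([(t1, m1), (t2, m2)] : List (Int × String)).find? (fun tm => decide (n ≥ tm.1)) with
     | some tm => acc ++ [tm.2]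
     | none => acc)
    = acc ++ (if n ≥ t1 then [m1] else if n ≥ t2 then [m2] else []) := by
  by_cases h1 : n ≥ t1 <;> by_cases h2 : n ≥ t2 <;> simp [List.find?, h1, h2]

theorem pv_countP_person (l : List String) :
    (l.countP (fun c => (["person"] : List String).contains c) : Int) = (l.count "person" : Int) := by
  have : l.countP (fun c => (["person"] : List String).contains c) = l.count "person" := by
    unfold List.count
    apply List.countP_congr
    intro a _
    by_cases h : a = "person" <;> simp [h]
  rw [this]

theorem pv_countP_vehicle (l : List String) :
    (l.countP (fun c => (["car", "bus", "motorbike"] : List String).contains c) : Int)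
      = (l.count "car" : Int) + (l.count "bus" : Int) + (l.count "motorbike" : Int) := by
  induction l with
  | nil => simp
  | cons h t ih =>
    simp only [List.countP_cons, List.count_cons]
    by_cases h1 : h = "car" <;> by_cases h2 : h = "bus" <;> by_cases h3 : h = "motorbike" <;>
      simp_all <;> omega

-- B's interpreter, evaluated over the two-rule table, as an explicit if-chain
theorem pv_alt_chain (detections : List (List (String × String))) (location : Option String) :
    get_specific_suggestions_py_alt detections location
    = (let p : Int := ((detections.map pvClass).count "person" : Int)
       let v : Int := ((detections.map pvClass).count "car" : Int)
                    + ((detections.map pvClass).count "bus" : Int)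
                    + ((detections.map pvClass).count "motorbike" : Int)
       (if p ≥ 3 then ["注意人员聚集情况，可能存在群体性活动"]
        else if p ≥ 1 then ["观察人员行为特征，确认是否有异常举动"] else [])
       ++ (if v ≥ 2 then ["注意车辆集群情况，可能存在协同行动"]
           else if v ≥ 1 then ["记录车辆特征和牌照信息"] else [])
       ++ (match location with
           | none => []
           | some s => if s == "" then [] else ["重点关注" ++ s ++ "方向的目标动向"])) := by
  unfold get_specific_suggestions_py_alt pvRules
  have hP : ((detections.map pvClass).countP (fun c => (["person"] : List String).contains c) : Int)
      = ((detections.map pvClass).count "person" : Int) := pv_countP_person _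
  have hV := pv_countP_vehicle (detections.map pvClass)
  simp only [List.foldl]
  rw [pv_rule2, pv_rule2, hP, hV]
  cases location with
  | none => simp
  | some s => by_cases h : (s == "") = true <;> simp [h]

-- ===== VERDICT (by name: the statement is the Claim_ definition above) =====
theorem get_specific_suggestions_py_spec : Claim_equal_get_specific_suggestions_py := by
  intro detections location _ _
  unfold Spec_get_specific_suggestions_py get_specific_suggestions_py
  rw [pv_fold_eq_counter, pv_alt_chain]
  simp only [PySem.Dict.contains_counter, PySem.Dict.getD_counter, List.foldl]
  have hp : ((detections.map pvClass).contains "person") = true ↔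
      (1 : Int) ≤ ((detections.map pvClass).count "person" : Int) := by
    rw [List.contains_iff_mem, ← List.count_pos_iff]
    constructor
    · intro h; exact_mod_cast h
    · intro h; exact_mod_cast h
  have hcount : ∀ v : String, ((detections.map pvClass).contains v) = false →
      ((detections.map pvClass).count v : Int) = 0 := by
    intro v h
    have h' : v ∉ detections.map pvClass := fun hm => by
      have hc := List.contains_iff_mem.mpr hm
      rw [h] at hc
      exact Bool.false_ne_true hc
    rw [List.count_eq_zero.mpr h']; rfl
  have hstep : ∀ (vc : Int) (v : String),
      (if ((detections.map pvClass).contains v) = true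
        then vc + ((detections.map pvClass).count v : Int) else vc)
      = vc + ((detections.map pvClass).count v : Int) := by
    intro vc v
    by_cases h : ((detections.map pvClass).contains v) = true
    · rw [if_pos h]
    · rw [if_neg h, hcount v (by simpa using h)]; ring
  simp only [hstep, List.nil_append]
  by_cases hper : ((detections.map pvClass).contains "person") = true
  · have h1 := hp.mp hper
    cases location with
    | none => simp only [hper, if_true]; split_ifs <;> first | omega | simp
    | some s => simp only [hper, if_true]; split_ifs <;> first | omega | simp
  · have h0 : ((detections.map pvClass).count "person" : Int) = 0 :=
      hcount _ (by simpa using hper)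
    cases location with
    | none => simp only [hper]; split_ifs <;> first | omega | simp
    | some s => simp only [hper]; split_ifs <;> first | omega | simp
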